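-- pv_equiv track=rewrite | github.com/AmirSahrani/Thesis | visualize.py | succes_decoder
-- ===== SOURCE A (Python) =====
-- def succes_decoder(sequence, start):
--     succes = []
--     for index,letter in enumerate(sequence):
--         if index == 0:
--             if letter == start:
--                 succes.append(1)
--             else:
--                 succes.append(0)
--         else:
--             if letter == last:
--                 succes.append(1)
--             else:
--                 succes.append(0)
--         last = letter
--     return succes
-- ===== SOURCE B (Python) =====
-- from itertools import groupby
--
-- def succes_decoder(sequence, start):
--     out = []
--     first = True
--     for key, grp in groupby(sequence):
--         run_len = sum(1 for _ in grp)
--         # first element of a run: matches predecessor only if this is the very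
--         # first run and the key equals start (a new run means the letter changed)
--         out.append(1 if first and key == start else 0)
--         # every further element of the run equals its predecessor
--         out.extend([1] * (run_len - 1))
--         first = False
--     return out
-- ===== Notes on version B (the rewrite author's own statement) =====
-- stated objective: alternative
-- what changed: B run-length groups the sequence with itertools.groupby and emits, per maximal run of equal consecutive letters, one flag for the run's first element (1 only for the very first run when its key equals start) followed by run_len-1 ones, instead of A's indexed loop comparing each letter to a carried `last` variable.
import Mathlib
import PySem

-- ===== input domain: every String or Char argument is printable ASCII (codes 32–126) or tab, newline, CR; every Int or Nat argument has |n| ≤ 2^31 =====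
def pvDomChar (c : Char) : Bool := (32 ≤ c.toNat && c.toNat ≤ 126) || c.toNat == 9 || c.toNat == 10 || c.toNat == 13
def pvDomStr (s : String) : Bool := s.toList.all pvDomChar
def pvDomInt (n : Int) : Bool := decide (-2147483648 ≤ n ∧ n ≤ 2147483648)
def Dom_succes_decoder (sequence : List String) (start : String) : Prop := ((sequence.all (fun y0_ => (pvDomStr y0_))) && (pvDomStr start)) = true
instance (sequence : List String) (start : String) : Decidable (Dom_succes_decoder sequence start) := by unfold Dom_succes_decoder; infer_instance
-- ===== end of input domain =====

-- B replaces A's element-by-element loop (carrying `last`) by run-length grouping: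
-- per maximal run of equal consecutive letters it emits one flag for the run head
-- and 1 for each remaining run element; objective: alternative algorithm, same cost.


-- ===== PORT A =====
-- loop over enumerate(sequence) carrying (succes, last); `last` is Option since it is unset at index 0
def succesStep (start : String) (acc : List Int × Option String) (p : Int × String) : List Int × Option String :=
  let index := p.1
  let letter := p.2
  let succes :=
    if index = 0 then
      if letter = start then acc.1 ++ [(1 : Int)] else acc.1 ++ [(0 : Int)]
    else
      if some letter = acc.2 then acc.1 ++ [(1 : Int)] else acc.1 ++ [(0 : Int)]
  (succes, some letter)

def succes_decoder (sequence : List String) (start : String) : List Int :=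
  ((PySem.List.enumerate sequence).foldl (succesStep start) ([], none)).1

-- ===== PORT B =====
-- itertools.groupby ported by hand (exact): takeRunB x xs = (length of the maximal
-- prefix of xs equal to x, the remainder); groupsB walks the runs.
def takeRunB (x : String) : List String → Nat × List String
  | [] => (0, [])
  | y :: ys => if y = x then ((takeRunB x ys).1 + 1, (takeRunB x ys).2) else (0, y :: ys)

theorem takeRunB_len (x : String) (xs : List String) : (takeRunB x xs).2.length ≤ xs.length := by
  induction xs with
  | nil => simp [takeRunB]
  | cons y ys ih =>
      simp only [takeRunB]
      split
      · exact Nat.le_succ_of_le ih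
      · exact Nat.le_refl _

def groupsB (start : String) : Bool → List String → List Int
  | _, [] => []
  | first, x :: xs =>
      let p := takeRunB x xs
      (if first && x = start then (1 : Int) else 0) :: (List.replicate p.1 (1 : Int) ++ groupsB start false p.2)
termination_by _ xs => xs.length
decreasing_by
  exact Nat.lt_succ_of_le (takeRunB_len x xs)

def succes_decoder_alt (sequence : List String) (start : String) : List Int :=
  groupsB start true sequence

-- ===== PRECONDITION & SPEC =====
def Spec_succes_decoder (sequence : List String) (start : String) (out : List Int) : Prop := out = succes_decoder_alt sequence start
instance (sequence : List String) (start : String) (out : List Int) : Decidable (Spec_succes_decoder sequence start out) := by unfold Spec_succes_decoder; infer_instance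

-- ===== CLAIM (what is proved, stated in full; the proofs are below) =====
def Claim_equal_succes_decoder : Prop := ∀ (sequence : List String) (start : String), Dom_succes_decoder sequence start → Spec_succes_decoder sequence start (succes_decoder sequence start)

-- ===== LEMMAS AND PROOFS =====
-- common reference form: each element compared with its predecessor (start first)
def cmpPrev (l : String) (xs : List String) : List Int :=
  List.zipWith (fun a b => if a = b then (1 : Int) else 0) (l :: xs) xs

-- A's fold equals the reference form
theorem succes_foldl (xs : List String) (k : Int) (hk : 1 ≤ k) (acc : List Int) (l : String) (start : String) :
    ((PySem.List.enumerate xs k).foldl (succesStep start) (acc, some l)).1 = acc ++ cmpPrev l xs := by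
  induction xs generalizing k acc l with
  | nil => simp [PySem.List.enumerate_nil, cmpPrev]
  | cons x xs ih =>
      simp only [PySem.List.enumerate_cons, List.foldl_cons, cmpPrev, List.zipWith_cons_cons]
      rw [succesStep, if_neg (by omega : ¬ k = 0)]
      by_cases h : x = l
      · simpa [h, cmpPrev] using ih (k+1) (by omega) (acc ++ [(1:Int)]) x
      · have h2 : ¬ l = x := fun e => h e.symm
        have h3 : ¬ some x = some l := by simpa using h
        simpa [h3, h2, cmpPrev] using ih (k+1) (by omega) (acc ++ [(0:Int)]) x

theorem takeRunB_spec (x : String) (xs : List String) :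
    xs = List.replicate (takeRunB x xs).1 x ++ (takeRunB x xs).2 ∧
      (∀ y, (takeRunB x xs).2.head? = some y → y ≠ x) := by
  induction xs with
  | nil => simp [takeRunB]
  | cons y ys ih =>
      by_cases h : y = x
      · simp only [takeRunB, if_pos h]
        exact ⟨by rw [List.replicate_succ, List.cons_append, ← ih.1, h], ih.2⟩
      · simp only [takeRunB, if_neg h]
        exact ⟨by simp, by intro z hz; simp at hz; subst hz; exact h⟩

-- the reference form over a run: head comparison then ones, then rest
theorem cmpPrev_replicate (x : String) (n : Nat) (rest : List String) :
    cmpPrev x (List.replicate n x ++ rest) = List.replicate n (1 : Int) ++ cmpPrev x rest := by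
  induction n with
  | zero => simp
  | succ m ih =>
      simp only [List.replicate_succ, List.cons_append, cmpPrev, List.zipWith_cons_cons] at *
      exact congrArg _ ih

-- B over non-first groups equals the reference form, given the head differs from l
theorem groupsB_false (start : String) (n : Nat) :
    ∀ xs : List String, xs.length ≤ n → ∀ l : String,
      (∀ y, xs.head? = some y → y ≠ l) → groupsB start false xs = cmpPrev l xs := by
  induction n with
  | zero =>
      intro xs hlen l _
      have : xs = [] := List.eq_nil_of_length_eq_zero (Nat.le_zero.mp hlen)
      simp [this, groupsB, cmpPrev]
  | succ m ih =>
      intro xs hlen l hhead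
      cases xs with
      | nil => simp [groupsB, cmpPrev]
      | cons x xs' =>
          have hxl : x ≠ l := hhead x rfl
          obtain ⟨hsplit, hresthead⟩ := takeRunB_spec x xs'
          have hrest : (takeRunB x xs').2.length ≤ m :=
            Nat.le_of_lt_succ (Nat.lt_of_le_of_lt (takeRunB_len x xs') (Nat.lt_of_succ_le hlen))
          have hrec := ih (takeRunB x xs').2 hrest x hresthead
          simp only [groupsB, Bool.false_and]
          conv_rhs => rw [show (x :: xs' : List String) = x :: (List.replicate (takeRunB x xs').1 x ++ (takeRunB x xs').2) from by rw [← hsplit]]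
          simp only [cmpPrev, List.zipWith_cons_cons]
          rw [show List.zipWith (fun a b => if a = b then (1:Int) else 0)
                (x :: (List.replicate (takeRunB x xs').1 x ++ (takeRunB x xs').2))
                (List.replicate (takeRunB x xs').1 x ++ (takeRunB x xs').2)
              = cmpPrev x (List.replicate (takeRunB x xs').1 x ++ (takeRunB x xs').2) from rfl,
            cmpPrev_replicate, hrec]
          have hlx : ¬ l = x := fun e => hxl e.symm
          simp [hlx]

-- ===== VERDICT (by name: the statement is the Claim_ definition above) =====
theorem succes_decoder_spec : Claim_equal_succes_decoder := by
  intro sequence start _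
  unfold Spec_succes_decoder
  have hA : succes_decoder sequence start = cmpPrev start sequence := by
    unfold succes_decoder
    cases sequence with
    | nil => simp [PySem.List.enumerate_nil, cmpPrev]
    | cons x xs =>
        simp only [PySem.List.enumerate_cons, List.foldl_cons]
        rw [show succesStep start ([], none) (0, x)
              = ((if x = start then [(1 : Int)] else [(0 : Int)]), some x) from by
            by_cases h : x = start <;> simp [succesStep, h]]
        rw [show ((0:Int) + 1) = 1 from rfl, succes_foldl xs 1 (by omega)]
        simp only [cmpPrev, List.zipWith_cons_cons]
        by_cases h : x = start
        · simp [h]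
        · have h2 : ¬ start = x := fun e => h e.symm
          simp [h, h2]
  have hB : succes_decoder_alt sequence start = cmpPrev start sequence := by
    unfold succes_decoder_alt
    cases sequence with
    | nil => simp [groupsB, cmpPrev]
    | cons x xs =>
        obtain ⟨hsplit, hresthead⟩ := takeRunB_spec x xs
        have hrec := groupsB_false start (takeRunB x xs).2.length (takeRunB x xs).2 (Nat.le_refl _) x hresthead
        simp only [groupsB, Bool.true_and]
        conv_rhs => rw [show (x :: xs : List String) = x :: (List.replicate (takeRunB x xs).1 x ++ (takeRunB x xs).2) from by rw [← hsplit]]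
        simp only [cmpPrev, List.zipWith_cons_cons]
        rw [show List.zipWith (fun a b => if a = b then (1:Int) else 0)
              (x :: (List.replicate (takeRunB x xs).1 x ++ (takeRunB x xs).2))
              (List.replicate (takeRunB x xs).1 x ++ (takeRunB x xs).2)
            = cmpPrev x (List.replicate (takeRunB x xs).1 x ++ (takeRunB x xs).2) from rfl,
          cmpPrev_replicate, hrec]
        by_cases h : x = start
        · simp [h]
        · have h2 : ¬ start = x := fun e => h e.symm
          simp [h, h2]
  rw [hA, hB]
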